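-- pv_equiv track=rewrite | github.com/surya20041/Litcoder-Solutions | Non-CS-Python/Labs/Grid Challenge.py | doSomething
-- ===== SOURCE A (Python) =====
-- def doSomething(rows, cols, grid_chars):
--     # Parse the input
--     grid = [list(grid_chars[i:i+cols]) for i in range(0, len(grid_chars), cols)]
--
--     # Sort each row
--     sorted_grid = [''.join(sorted(row)) for row in grid]
--
--     # Check if columns are sorted
--     transposed_grid = list(zip(*sorted_grid))
--     if all(''.join(col) == ''.join(sorted(col)) for col in transposed_grid):
--         return "YES"
--     else:
--         return "NO"
-- ===== SOURCE B (Python) =====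
-- def doSomething(rows, cols, grid_chars):
--     # sort each row while parsing; single pairwise-adjacent column scan instead of transpose + column sorts
--     grid = [sorted(grid_chars[i:i+cols]) for i in range(0, len(grid_chars), cols)]
--     if not grid:
--         return "YES"
--     m = min(len(r) for r in grid)
--     for i in range(len(grid) - 1):
--         for j in range(m):
--             if grid[i][j] > grid[i + 1][j]:
--                 return "NO"
--     return "YES"
-- ===== Notes on version B (the rewrite author's own statement) =====
-- stated objective: alternative
-- what changed: Replaces the transpose-and-sort-each-column check with a direct pairwise scan of adjacent sorted rows over the globally shortest row length, eliminating the transposition and all column sorts.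
import Mathlib
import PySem

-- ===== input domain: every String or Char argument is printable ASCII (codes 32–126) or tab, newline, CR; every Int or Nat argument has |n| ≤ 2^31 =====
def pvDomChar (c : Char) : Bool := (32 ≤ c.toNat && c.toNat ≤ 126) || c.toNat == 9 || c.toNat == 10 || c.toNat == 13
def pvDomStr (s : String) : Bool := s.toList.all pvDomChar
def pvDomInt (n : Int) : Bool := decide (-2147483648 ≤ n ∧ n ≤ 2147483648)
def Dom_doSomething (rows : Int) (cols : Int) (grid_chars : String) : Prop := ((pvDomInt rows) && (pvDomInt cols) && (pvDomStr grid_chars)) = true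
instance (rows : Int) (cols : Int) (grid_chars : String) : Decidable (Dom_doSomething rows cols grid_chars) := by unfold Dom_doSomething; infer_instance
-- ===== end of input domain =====

-- B replaces the transpose-and-sort-each-column check with a direct pairwise scan of adjacent
-- sorted rows over the globally shortest row length (objective: alternative).

-- ===== PORT A =====
-- zip(*rows): the columns, truncated to the shortest row (zip() with no args is []).
def pyZipStar (ls : List (List Char)) : List (List Char) :=
  (List.range (((ls.map List.length).min?).getD 0)).map (fun j => ls.map (fun r => r.getD j ' '))

def doSomething (rows : Int) (cols : Int) (grid_chars : String) : String :=
  let s := grid_chars.toList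
  let grid := (PySem.List.pyRange 0 (s.length : Int) cols).map
      (fun i => PySem.List.slice s (some i) (some (i + cols)))
  let sorted_grid := grid.map (fun row => PySem.List.sorted row (fun c => c) false)
  let transposed := pyZipStar sorted_grid
  if transposed.all (fun col => col = PySem.List.sorted col (fun c => c) false) then "YES" else "NO"

-- ===== PORT B =====
def doSomething_alt (rows : Int) (cols : Int) (grid_chars : String) : String :=
  let s := grid_chars.toList
  let grid := (PySem.List.pyRange 0 (s.length : Int) cols).map
      (fun i => PySem.List.sorted (PySem.List.slice s (some i) (some (i + cols))) (fun c => c) false)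
  if grid = [] then "YES"
  else
    let m := ((grid.map List.length).min?).getD 0
    -- the two early-return loops of Source B, as nested 'all'
    if (List.range (grid.length - 1)).all (fun i =>
        (List.range m).all (fun j =>
          ¬ ((grid.getD i []).getD j ' ' > (grid.getD (i + 1) []).getD j ' '))) then "YES" else "NO"

-- ===== PRECONDITION & SPEC =====
-- cols = 0 makes range(0, len, cols) raise ValueError in Python (both A and B); only that is excluded.
def Pre_doSomething (rows : Int) (cols : Int) (grid_chars : String) : Prop := cols ≠ 0
instance (rows : Int) (cols : Int) (grid_chars : String) : Decidable (Pre_doSomething rows cols grid_chars) := by unfold Pre_doSomething; infer_instance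
def pvWitness_doSomething : Int × Int × String := (2, 2, "dbca")

def Spec_doSomething (rows : Int) (cols : Int) (grid_chars : String) (out : String) : Prop := out = doSomething_alt rows cols grid_chars
instance (rows : Int) (cols : Int) (grid_chars : String) (out : String) : Decidable (Spec_doSomething rows cols grid_chars out) := by unfold Spec_doSomething; infer_instance

-- ===== CLAIM (what is proved, stated in full; the proofs are below) =====
def Claim_equal_doSomething : Prop := ∀ (rows : Int) (cols : Int) (grid_chars : String), Dom_doSomething rows cols grid_chars → Pre_doSomething rows cols grid_chars → Spec_doSomething rows cols grid_chars (doSomething rows cols grid_chars)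

-- ===== LEMMAS AND PROOFS =====

theorem min_getD_le (l : List Nat) (x : Nat) (hx : x ∈ l) : l.min?.getD 0 ≤ x := by
  rcases h : l.min? with _ | v
  · rw [List.min?_eq_none_iff] at h; simp [h] at hx
  · simpa using (List.min?_eq_some_iff.mp h).2 x hx

-- a list is pairwise ≤ iff every adjacent pair is ≤
theorem pairwise_iff_adjacent (l : List Char) :
    l.Pairwise (· ≤ ·) ↔ ∀ i, i + 1 < l.length → l.getD i ' ' ≤ l.getD (i + 1) ' ' := by
  rw [List.pairwise_iff_getElem]
  constructor
  · intro h i hi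
    have := h i (i + 1) (by omega) hi (by omega)
    simpa [List.getD_eq_getElem?_getD, List.getElem?_eq_getElem, hi,
      (by omega : i < l.length)] using this
  · intro h
    have key : ∀ j, j < l.length → ∀ i, i < j → l.getD i ' ' ≤ l.getD j ' ' := by
      intro j
      induction j with
      | zero => omega
      | succ n ih =>
        intro hj i hij
        have hn : l.getD n ' ' ≤ l.getD (n + 1) ' ' := h n hj
        rcases Nat.lt_or_ge i n with h1 | h1
        · exact le_trans (ih (by omega) i h1) hn
        · have : i = n := by omega
          subst this; exact hn
    intro i j hi hj hij
    have := key j hj i hij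
    simpa [List.getD_eq_getElem?_getD, List.getElem?_eq_getElem, hi, hj] using this

-- A's column check equals B's adjacent-row check, for any list of rows
theorem checks_eq (G : List (List Char)) :
    ((pyZipStar G).all (fun col => col = PySem.List.sorted col (fun c => c) false))
  = ((List.range (G.length - 1)).all (fun i =>
        (List.range (((G.map List.length).min?).getD 0)).all (fun j =>
          ¬ ((G.getD i []).getD j ' ' > (G.getD (i + 1) []).getD j ' ')))) := by
  unfold pyZipStar
  set m := ((G.map List.length).min?).getD 0 with hm
  have hml : ∀ r ∈ G, m ≤ r.length := fun r hr => min_getD_le _ _ (List.mem_map_of_mem hr)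
  rw [List.all_map]
  rw [Bool.eq_iff_iff]
  simp only [List.all_eq_true, List.mem_range, Function.comp, decide_eq_true_eq]
  have hgd : ∀ i j, i < G.length → j < m →
      (G.map (fun r => r.getD j ' ')).getD i ' ' = (G.getD i []).getD j ' ' := by
    intro i j hi _
    rw [List.getD_eq_getElem?_getD, List.getElem?_map,
      List.getElem?_eq_getElem hi]
    simp [List.getD_eq_getElem?_getD, List.getElem?_eq_getElem hi]
  constructor
  · intro h i hi j hj
    have hc := h j hj
    have hp : (G.map (fun r => r.getD j ' ')).Pairwise (· ≤ ·) := by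
      rw [hc]
      exact PySem.List.sorted_pairwise (G.map (fun r => r.getD j ' ')) (fun c => c)
    have hadj := (pairwise_iff_adjacent _).mp hp i
      (by rw [List.length_map]; omega)
    rw [hgd i j (by omega) hj, hgd (i+1) j (by omega) hj] at hadj
    simpa using hadj
  · intro h j hj
    have hp : (G.map (fun r => r.getD j ' ')).Pairwise (· ≤ ·) := by
      apply (pairwise_iff_adjacent _).mpr
      intro i hi
      rw [List.length_map] at hi
      have := h i (by omega) j hj
      rw [hgd i j (by omega) hj, hgd (i+1) j (by omega) hj]
      simpa using this
    exact (PySem.List.sorted_eq_self_of_pairwise (G.map (fun r => r.getD j ' ')) (fun c => c) hp).symm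

-- value-level bridge: A's whole expression equals B's, for any index list and row function
theorem main_eq (idx : List Int) (f : Int → List Char) :
    (if (pyZipStar ((idx.map f).map (fun row => PySem.List.sorted row (fun c => c) false))).all
        (fun col => col = PySem.List.sorted col (fun c => c) false) then "YES" else "NO")
  = (let G := idx.map (fun i => PySem.List.sorted (f i) (fun c => c) false)
     if G = [] then "YES"
     else if (List.range (G.length - 1)).all (fun i =>
        (List.range (((G.map List.length).min?).getD 0)).all (fun j =>
          ¬ ((G.getD i []).getD j ' ' > (G.getD (i + 1) []).getD j ' '))) then "YES" else "NO") := by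
  have hmm : (idx.map f).map (fun row => PySem.List.sorted row (fun c => c) false)
      = idx.map (fun i => PySem.List.sorted (f i) (fun c => c) false) := by
    rw [List.map_map]; rfl
  rw [hmm, checks_eq]
  by_cases hGe : idx.map (fun i => PySem.List.sorted (f i) (fun c => c) false) = []
  · simp [hGe]
  · simp [hGe]

-- the main proof
theorem doSomething_spec : Claim_equal_doSomething := by
  intro rows cols grid_chars _ _
  unfold Spec_doSomething doSomething doSomething_alt
  exact main_eq (PySem.List.pyRange 0 ((grid_chars.toList.length : Int)) cols)
    (fun i => PySem.List.slice grid_chars.toList (some i) (some (i + cols)))
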